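-- pv_equiv track=rewrite | github.com/higher-bridge/copying-task-uu | analysis/simulation_helper.py | create_all_encoding_schemes
-- ===== SOURCE A (Python) =====
-- def create_all_encoding_schemes(max_k:int=4):
--     max_k += 1
--     combinations = []
--
--     for i in range(1, max_k):
--         for j in range(1, max_k):
--             for k in range(1, max_k):
--                 for l in range(1, max_k):
--                     if i <= j and j <= k and k <= l:
--                         option = [i, j, k, l]
--                         combinations.append(option)
--
--     return combinations
-- ===== SOURCE B (Python) =====
-- def create_all_encoding_schemes(max_k: int = 4):
--     # Recursive prefix extension: generate non-decreasing quadruples directly,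
--     # extending each prefix only with values >= its last element; the last
--     # position is filled by a single comprehension.
--     def extend(prefix, lo, depth):
--         if depth == 1:
--             return [prefix + [v] for v in range(lo, max_k + 1)]
--         result = []
--         for v in range(lo, max_k + 1):
--             result += extend(prefix + [v], v, depth - 1)
--         return result
--     return extend([], 1, 4)
-- ===== Notes on version B (the rewrite author's own statement) =====
-- stated objective: faster
-- what changed: Replaced the four nested 1..max_k loops with a filter by a recursive prefix-extension that only ever generates non-decreasing quadruples (each new value starts at the previous one), so no candidate is ever discarded.
import Mathlib
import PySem

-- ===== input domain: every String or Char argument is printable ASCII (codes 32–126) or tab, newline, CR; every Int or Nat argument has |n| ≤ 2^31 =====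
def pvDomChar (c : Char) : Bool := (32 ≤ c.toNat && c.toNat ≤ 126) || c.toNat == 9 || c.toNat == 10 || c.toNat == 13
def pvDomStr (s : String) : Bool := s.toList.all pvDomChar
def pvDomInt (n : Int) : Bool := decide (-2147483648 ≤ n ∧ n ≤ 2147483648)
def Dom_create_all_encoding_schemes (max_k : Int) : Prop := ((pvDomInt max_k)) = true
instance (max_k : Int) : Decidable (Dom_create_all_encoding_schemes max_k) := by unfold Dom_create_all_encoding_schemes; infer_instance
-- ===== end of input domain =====

-- B replaces A's four nested full-range loops with a final filter by a recursive
-- prefix-extension that only ever generates non-decreasing quadruples (objective: faster).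

-- ===== PORT A =====
-- literal transliteration of A: `max_k += 1` is inlined as `max_k + 1` in the four
-- nested loops over range(1, max_k+1); the filtered append is the if inside.
def create_all_encoding_schemes (max_k : Int) : List (List Int) :=
  (PySem.List.pyRange 1 (max_k + 1) 1).foldl (fun acc i =>
    (PySem.List.pyRange 1 (max_k + 1) 1).foldl (fun acc j =>
      (PySem.List.pyRange 1 (max_k + 1) 1).foldl (fun acc k =>
        (PySem.List.pyRange 1 (max_k + 1) 1).foldl (fun acc l =>
          if i ≤ j ∧ j ≤ k ∧ k ≤ l then acc ++ [[i, j, k, l]] else acc) acc) acc) acc) []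

-- ===== PORT B =====
-- literal transliteration of Source B's recursive helper `extend(prefix, lo, depth)`:
-- the depth == 1 comprehension is the `.map`; B never calls extend with depth 0
-- (the 0-case below is only a termination base and is unreachable from the entry point)
def pvExtend (max_k : Int) (pre : List Int) (lo : Int) : Nat → List (List Int)
  | 0 => []
  | 1 => (PySem.List.pyRange lo (max_k + 1) 1).map (fun v => pre ++ [v])
  | d + 2 =>
    (PySem.List.pyRange lo (max_k + 1) 1).foldl
      (fun acc v => acc ++ pvExtend max_k (pre ++ [v]) v (d + 1)) []

def create_all_encoding_schemes_alt (max_k : Int) : List (List Int) :=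
  pvExtend max_k [] 1 4

-- ===== PRECONDITION & SPEC =====
def Spec_create_all_encoding_schemes (max_k : Int) (out : List (List Int)) : Prop := out = create_all_encoding_schemes_alt max_k
instance (max_k : Int) (out : List (List Int)) : Decidable (Spec_create_all_encoding_schemes max_k out) := by unfold Spec_create_all_encoding_schemes; infer_instance

-- ===== CLAIM (what is proved, stated in full; the proofs are below) =====
def Claim_equal_create_all_encoding_schemes : Prop := ∀ (max_k : Int), Dom_create_all_encoding_schemes max_k → Spec_create_all_encoding_schemes max_k (create_all_encoding_schemes max_k)

-- ===== LEMMAS AND PROOFS =====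

theorem pvExtend_one (mk : Int) (pre : List Int) (lo : Int) :
    pvExtend mk pre lo 1 = (PySem.List.pyRange lo (mk + 1) 1).map (fun v => pre ++ [v]) := rfl

theorem pvExtend_ge2 (mk : Int) (pre : List Int) (lo : Int) (d : Nat) :
    pvExtend mk pre lo (d + 2) =
      (PySem.List.pyRange lo (mk + 1) 1).flatMap (fun v => pvExtend mk (pre ++ [v]) v (d + 1)) := by
  simp only [pvExtend, PySem.List.foldl_append_eq_flatMap, List.nil_append]

theorem pvExtend_two (mk : Int) (pre : List Int) (lo : Int) :
    pvExtend mk pre lo 2 =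
      (PySem.List.pyRange lo (mk + 1) 1).flatMap (fun v => pvExtend mk (pre ++ [v]) v 1) :=
  pvExtend_ge2 mk pre lo 0

theorem pvExtend_three (mk : Int) (pre : List Int) (lo : Int) :
    pvExtend mk pre lo 3 =
      (PySem.List.pyRange lo (mk + 1) 1).flatMap (fun v => pvExtend mk (pre ++ [v]) v 2) :=
  pvExtend_ge2 mk pre lo 1

theorem pvExtend_four (mk : Int) (pre : List Int) (lo : Int) :
    pvExtend mk pre lo 4 =
      (PySem.List.pyRange lo (mk + 1) 1).flatMap (fun v => pvExtend mk (pre ++ [v]) v 3) :=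
  pvExtend_ge2 mk pre lo 2

theorem pv_flatMap_if {α β : Type} (l : List α) (p : α → Prop) [DecidablePred p] (g : α → List β) :
    l.flatMap (fun x => if p x then g x else []) = (l.filter (fun x => decide (p x))).flatMap g := by
  induction l with
  | nil => rfl
  | cons x xs ih =>
    simp only [List.flatMap_cons, List.filter_cons]
    by_cases h : p x <;> simp [h, ih]

-- filtering a range from c by (a ≤ ·) when c ≤ a is the range from a
theorem pv_filter_ge_aux (M : Int) : ∀ (n : Nat) (c a : Int), (M - c).toNat = n → c ≤ a →
    (PySem.List.pyRange c M 1).filter (fun x => decide (a ≤ x)) = PySem.List.pyRange a M 1 := by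
  intro n
  induction n with
  | zero =>
    intro c a hn hca
    rw [PySem.List.pyRange_one_eq_nil (by omega), PySem.List.pyRange_one_eq_nil (by omega)]
    rfl
  | succ n ih =>
    intro c a hn hca
    rw [PySem.List.pyRange_one_cons (by omega)]
    by_cases hac : a ≤ c
    · have hac' : a = c := le_antisymm hac hca
      subst hac'
      rw [List.filter_cons_of_pos (by simp)]
      have hall : (PySem.List.pyRange (a + 1) M 1).filter (fun x => decide (a ≤ x)) =
          PySem.List.pyRange (a + 1) M 1 := by
        apply List.filter_eq_self.mpr
        intro x hx
        have := (PySem.List.mem_pyRange_one.mp hx).1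
        simp only [decide_eq_true_eq]
        omega
      rw [hall, ← PySem.List.pyRange_one_cons (by omega)]
    · rw [List.filter_cons_of_neg (by simp only [decide_eq_true_eq]; omega)]
      exact ih (c + 1) a (by omega) (by omega)

theorem pv_filter_ge (M c a : Int) (h : c ≤ a) :
    (PySem.List.pyRange c M 1).filter (fun x => decide (a ≤ x)) = PySem.List.pyRange a M 1 :=
  pv_filter_ge_aux M (M - c).toNat c a rfl h

-- a guarded flatMap over a range from c, guard (a ≤ ·), c ≤ a, is the flatMap over the range from a
theorem pv_flatMap_guard {β : Type} (M c a : Int) (h : c ≤ a) (g : Int → List β) :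
    (PySem.List.pyRange c M 1).flatMap (fun x => if a ≤ x then g x else []) =
      (PySem.List.pyRange a M 1).flatMap g := by
  rw [pv_flatMap_if, pv_filter_ge M c a h]

-- ===== VERDICT (by name: the statement is the Claim_ definition above) =====
theorem create_all_encoding_schemes_spec : Claim_equal_create_all_encoding_schemes := by
  intro max_k _
  unfold Spec_create_all_encoding_schemes create_all_encoding_schemes create_all_encoding_schemes_alt
  simp only [pvExtend_four, pvExtend_three, pvExtend_two, pvExtend_one,
    PySem.List.foldl_append_ite, PySem.List.foldl_append_eq_flatMap,
    List.nil_append, List.cons_append]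
  apply List.flatMap_congr
  intro i hi
  have h1i : 1 ≤ i := (PySem.List.mem_pyRange_one.mp hi).1
  rw [← pv_flatMap_guard (max_k + 1) 1 i h1i]
  apply List.flatMap_congr
  intro j hj
  have h1j : 1 ≤ j := (PySem.List.mem_pyRange_one.mp hj).1
  by_cases hij : i ≤ j
  · rw [if_pos hij, ← pv_flatMap_guard (max_k + 1) 1 j h1j]
    apply List.flatMap_congr
    intro k hk
    have h1k : 1 ≤ k := (PySem.List.mem_pyRange_one.mp hk).1
    by_cases hjk : j ≤ k
    · rw [if_pos hjk]
      have hfil : ((PySem.List.pyRange 1 (max_k + 1) 1).filter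
            (fun l => decide (i ≤ j ∧ j ≤ k ∧ k ≤ l))) =
          (PySem.List.pyRange 1 (max_k + 1) 1).filter (fun l => decide (k ≤ l)) := by
        apply List.filter_congr
        intro l _
        simp [hij, hjk]
      rw [hfil, pv_filter_ge (max_k + 1) 1 k h1k]
    · rw [if_neg hjk]
      have hfil : ((PySem.List.pyRange 1 (max_k + 1) 1).filter
            (fun l => decide (i ≤ j ∧ j ≤ k ∧ k ≤ l))) = [] := by
        apply List.filter_eq_nil_iff.mpr
        intro l _
        simp [hjk]
      rw [hfil]
      rfl
  · rw [if_neg hij]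
    have hz : ∀ k ∈ PySem.List.pyRange 1 (max_k + 1) 1,
        ((PySem.List.pyRange 1 (max_k + 1) 1).filter
            (fun l => decide (i ≤ j ∧ j ≤ k ∧ k ≤ l))).map (fun l => [i, j, k, l]) =
          ([] : List (List Int)) := by
      intro k _
      have hfil : ((PySem.List.pyRange 1 (max_k + 1) 1).filter
            (fun l => decide (i ≤ j ∧ j ≤ k ∧ k ≤ l))) = [] := by
        apply List.filter_eq_nil_iff.mpr
        intro l _
        simp [hij]
      rw [hfil]
      rfl
    rw [List.flatMap_congr hz]
    simp
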